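-- pv_equiv track=rewrite | github.com/dolmas1/AoC_2024 | solns/day06.py | solve_pt1
-- ===== SOURCE A (Python) =====
-- def get_front_coords(current_loc, current_dir):
--     i, j = current_loc
--     if current_dir == 0: # looking up
--         return (i - 1, j)
--     elif current_dir == 1: # looking right
--         return (i, j + 1)
--     elif current_dir == 2: # looking down
--         return (i + 1, j)
--     elif current_dir == 3: # looking left
--         return (i, j - 1)
--
-- def out_of_bounds(loc, width, height):
--     i, j = loc
--     if i < 0 or i+1 > height or j < 0 or j+1 > width:
--         return True
--     else:
--         return False
--
-- def step(puzzle_input, current_loc, current_dir, done):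
--
--     alternate_state = None
--     front_coords = get_front_coords(current_loc, current_dir)
--
--     # if walking forwards will exit the grid, we are done
--     if out_of_bounds(front_coords, width = len(puzzle_input[0]), height = len(puzzle_input)):
--         done = True
--         return current_loc, current_dir, done, alternate_state
--
--     # if obstacle in front, stay still but turn to the right
--     elif puzzle_input[front_coords[0]][front_coords[1]] == '#':
--         return current_loc, (current_dir + 1)%4, done, alternate_state
--
--     # else, walk forward
--     else:
--         alternate_state = (current_loc, (current_dir + 1)%4) # what would've happened if there WAS an obstacle
--         return front_coords, current_dir, done, alternate_state
--
-- def solve_pt1(puzzle_input, starting_loc):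
--     # Set up initial conditions
--     loc = starting_loc
--     facing = 0
--     done = False
--
--     # Walk the grid
--     visited_squares = set()
--
--     while not done:
--         visited_squares.add(loc)
--         loc, facing, done, _ = step(puzzle_input, loc, facing, done)
--
--
--     ans_1 = len(visited_squares)
--
--     return ans_1, visited_squares
-- ===== SOURCE B (Python) =====
-- def solve_pt1(puzzle_input, starting_loc):
--     height = len(puzzle_input)
--     width = len(puzzle_input[0])
--     # obstacle index, built once: '#' rows per column / '#' columns per row (ascending)
--     col_obs = [[r for r in range(height) if puzzle_input[r][j] == '#'] for j in range(width)]
--     row_obs = [[c for c in range(width) if puzzle_input[i][c] == '#'] for i in range(height)]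
--     visited = {starting_loc}
--     (i, j), facing = starting_loc, 0
--     while True:
--         if facing == 0:  # up: jump to just below the nearest '#' above, or off the top
--             if i - 1 < 0 or i - 1 >= height or j < 0 or j >= width:
--                 return len(visited), visited
--             rs = [r for r in col_obs[j] if r < i]
--             stop = max(rs) + 1 if rs else 0
--             for r in range(i - 1, stop - 1, -1):
--                 visited.add((r, j))
--             i = stop
--             if not rs:
--                 return len(visited), visited
--         elif facing == 1:  # right
--             if i < 0 or i >= height or j + 1 < 0 or j + 1 >= width:
--                 return len(visited), visited
--             cs = [c for c in row_obs[i] if c > j]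
--             stop = min(cs) - 1 if cs else width - 1
--             for c in range(j + 1, stop + 1):
--                 visited.add((i, c))
--             j = stop
--             if not cs:
--                 return len(visited), visited
--         elif facing == 2:  # down
--             if i + 1 < 0 or i + 1 >= height or j < 0 or j >= width:
--                 return len(visited), visited
--             rs = [r for r in col_obs[j] if r > i]
--             stop = min(rs) - 1 if rs else height - 1
--             for r in range(i + 1, stop + 1):
--                 visited.add((r, j))
--             i = stop
--             if not rs:
--                 return len(visited), visited
--         else:  # left
--             if i < 0 or i >= height or j - 1 < 0 or j - 1 >= width:
--                 return len(visited), visited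
--             cs = [c for c in row_obs[i] if c < j]
--             stop = max(cs) + 1 if cs else 0
--             for c in range(j - 1, stop - 1, -1):
--                 visited.add((i, c))
--             j = stop
--             if not cs:
--                 return len(visited), visited
--         facing = (facing + 1) % 4
-- ===== Notes on version B (the rewrite author's own statement) =====
-- stated objective: alternative
-- what changed: Replaces A's per-cell step() state machine (which re-reads the grid cell by cell on every iteration and threads a done flag plus an unused alternate_state through a 4-tuple) by a precomputed obstacle index -- the '#' rows of every column and '#' columns of every row, built in one pass over the grid -- so that each straight run is resolved by a single max/min lookup in the index and the guard jumps from turn to turn, never probing grid characters during the walk.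
-- outside the precondition, e.g. on solve_pt1(['..', '.'], (0, 0)): A returns (1, {(0, 0)}), B raises IndexError
import Mathlib
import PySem

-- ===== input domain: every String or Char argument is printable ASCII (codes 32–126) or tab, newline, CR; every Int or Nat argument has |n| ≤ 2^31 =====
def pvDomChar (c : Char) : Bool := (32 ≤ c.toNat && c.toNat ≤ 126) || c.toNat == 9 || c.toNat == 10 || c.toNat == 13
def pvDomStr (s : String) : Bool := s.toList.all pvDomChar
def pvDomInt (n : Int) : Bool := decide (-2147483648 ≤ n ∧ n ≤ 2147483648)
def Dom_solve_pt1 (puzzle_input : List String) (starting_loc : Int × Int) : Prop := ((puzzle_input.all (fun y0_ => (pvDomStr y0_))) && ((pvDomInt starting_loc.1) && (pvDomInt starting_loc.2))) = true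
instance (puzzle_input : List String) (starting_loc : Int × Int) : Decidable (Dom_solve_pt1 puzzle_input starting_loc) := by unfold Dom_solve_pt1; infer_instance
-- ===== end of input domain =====

-- B replaces A's per-cell step() state machine by a precomputed obstacle index
-- ('#' rows per column / '#' columns per row) and jumps whole straight runs via one
-- max/min lookup per turn; objective: alternative algorithm, same visited set/count.

-- ===== PORT A =====
def get_front_coords (current_loc : Int × Int) (current_dir : Int) : Int × Int :=
  let i := current_loc.1
  let j := current_loc.2
  if current_dir = 0 then (i - 1, j)
  else if current_dir = 1 then (i, j + 1)
  else if current_dir = 2 then (i + 1, j)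
  else (i, j - 1)  -- current_dir = 3 (solve_pt1 only ever passes a dir in 0..3)

def out_of_bounds (loc : Int × Int) (width height : Int) : Bool :=
  if loc.1 < 0 ∨ loc.1 + 1 > height ∨ loc.2 < 0 ∨ loc.2 + 1 > width then true else false

-- step(...) without the alternate_state component (solve_pt1 discards it);
-- none = IndexError (empty grid or ragged row), exact via PySem.List/Str.pyGet?
def stepA (puzzle_input : List String) (current_loc : Int × Int) (current_dir : Int)
    (done : Bool) : Option ((Int × Int) × Int × Bool) :=
  let front_coords := get_front_coords current_loc current_dir
  match PySem.List.pyGet? puzzle_input 0 with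
  | none => none  -- puzzle_input[0] raises IndexError on an empty grid
  | some row0 =>
    if out_of_bounds front_coords (PySem.Str.len row0) puzzle_input.length then
      some (current_loc, current_dir, true)
    else
      match PySem.List.pyGet? puzzle_input front_coords.1 with
      | none => none
      | some row =>
        match PySem.Str.pyGet? row front_coords.2 with
        | none => none  -- IndexError on a ragged row
        | some c =>
          if c = '#' then some (current_loc, PySem.Int.mod (current_dir + 1) 4, done)
          else some (front_coords, current_dir, done)

-- the while-not-done loop; fuel only makes the recursion total (never exhausted under Pre_)
def loopA (puzzle_input : List String) :
    Nat → (Int × Int) → Int → Bool → PySem.Set (Int × Int) → Option (Int × (List (Int × Int)))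
  | 0, _, _, _, _ => none
  | fuel + 1, loc, facing, done, visited =>
    if done then some ((visited.length : Int), visited)
    else
      let visited' := PySem.Set.add visited loc
      match stepA puzzle_input loc facing done with
      | none => none
      | some (loc', facing', done') => loopA puzzle_input fuel loc' facing' done' visited'

-- fuel bound: a terminating walk halts within the number of (loc, dir) states,
-- which is at most 4·(h+2)·(w+2); used by both ports and by Pre_'s halting condition
def pvFuel (puzzle_input : List String) : Nat :=
  4 * (puzzle_input.length + 2) * ((puzzle_input.headD "").toList.length + 2) + 8

def solve_pt1 (puzzle_input : List String) (starting_loc : Int × Int) : Int × (List (Int × Int)) :=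
  match loopA puzzle_input (pvFuel puzzle_input + 2) starting_loc 0 false PySem.Set.empty with
  | some r => r
  | none => (0, [])

-- ===== PORT B =====
-- puzzle_input[i][j] of the index-building comprehensions (i, j always in range there;
-- Python raises IndexError on a ragged short row — outside Pre_, where this reads none)
def cellB (puzzle_input : List String) (i j : Int) : Option Char :=
  match PySem.List.pyGet? puzzle_input i with
  | none => none
  | some row => PySem.Str.pyGet? row j

-- col_obs[j] / row_obs[i] of Source B; the lists are only ever indexed in range, so each
-- entry is ported as the function of its index
def colObs (puzzle_input : List String) (j : Int) : List Int :=
  (PySem.List.pyRange 0 (puzzle_input.length : Int) 1).filter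
    (fun r => cellB puzzle_input r j == some '#')

def rowObs (puzzle_input : List String) (w i : Int) : List Int :=
  (PySem.List.pyRange 0 w 1).filter (fun c => cellB puzzle_input i c == some '#')

-- the while-True loop of Source B: one iteration = one straight run (resolved by a
-- max/min over the obstacle index) followed by a right turn or a return
def segLoop (puzzle_input : List String) (h w : Int) :
    Nat → Int → (Int × Int) → PySem.Set (Int × Int) → Option (Int × (List (Int × Int)))
  | 0, _, _, _ => none
  | fuel + 1, facing, (i, j), visited =>
    if facing = 0 then
      if i - 1 < 0 ∨ h ≤ i - 1 ∨ j < 0 ∨ w ≤ j then some ((visited.length : Int), visited)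
      else
        let rs := (colObs puzzle_input j).filter (fun r => decide (r < i))
        match PySem.List.max? rs (fun x => x) with
        | some m =>
          let stop := m + 1
          let v' := (PySem.List.pyRange (i - 1) (stop - 1) (-1)).foldl
            (fun s r => PySem.Set.add s (r, j)) visited
          segLoop puzzle_input h w fuel (PySem.Int.mod (facing + 1) 4) (stop, j) v'
        | none =>
          let v' := (PySem.List.pyRange (i - 1) (0 - 1) (-1)).foldl
            (fun s r => PySem.Set.add s (r, j)) visited
          some ((v'.length : Int), v')
    else if facing = 1 then
      if i < 0 ∨ h ≤ i ∨ j + 1 < 0 ∨ w ≤ j + 1 then some ((visited.length : Int), visited)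
      else
        let cs := (rowObs puzzle_input w i).filter (fun c => decide (j < c))
        match PySem.List.min? cs (fun x => x) with
        | some m =>
          let stop := m - 1
          let v' := (PySem.List.pyRange (j + 1) (stop + 1) 1).foldl
            (fun s c => PySem.Set.add s (i, c)) visited
          segLoop puzzle_input h w fuel (PySem.Int.mod (facing + 1) 4) (i, stop) v'
        | none =>
          let stop := w - 1
          let v' := (PySem.List.pyRange (j + 1) (stop + 1) 1).foldl
            (fun s c => PySem.Set.add s (i, c)) visited
          some ((v'.length : Int), v')
    else if facing = 2 then
      if i + 1 < 0 ∨ h ≤ i + 1 ∨ j < 0 ∨ w ≤ j then some ((visited.length : Int), visited)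
      else
        let rs := (colObs puzzle_input j).filter (fun r => decide (i < r))
        match PySem.List.min? rs (fun x => x) with
        | some m =>
          let stop := m - 1
          let v' := (PySem.List.pyRange (i + 1) (stop + 1) 1).foldl
            (fun s r => PySem.Set.add s (r, j)) visited
          segLoop puzzle_input h w fuel (PySem.Int.mod (facing + 1) 4) (stop, j) v'
        | none =>
          let stop := h - 1
          let v' := (PySem.List.pyRange (i + 1) (stop + 1) 1).foldl
            (fun s r => PySem.Set.add s (r, j)) visited
          some ((v'.length : Int), v')
    else
      if i < 0 ∨ h ≤ i ∨ j - 1 < 0 ∨ w ≤ j - 1 then some ((visited.length : Int), visited)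
      else
        let cs := (rowObs puzzle_input w i).filter (fun c => decide (c < j))
        match PySem.List.max? cs (fun x => x) with
        | some m =>
          let stop := m + 1
          let v' := (PySem.List.pyRange (j - 1) (stop - 1) (-1)).foldl
            (fun s c => PySem.Set.add s (i, c)) visited
          segLoop puzzle_input h w fuel (PySem.Int.mod (facing + 1) 4) (i, stop) v'
        | none =>
          let v' := (PySem.List.pyRange (j - 1) (0 - 1) (-1)).foldl
            (fun s c => PySem.Set.add s (i, c)) visited
          some ((v'.length : Int), v')

def solve_pt1_alt (puzzle_input : List String) (starting_loc : Int × Int) : Int × (List (Int × Int)) :=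
  match PySem.List.pyGet? puzzle_input 0 with
  | none => (0, [])  -- len(puzzle_input[0]) raises IndexError on an empty grid
  | some row0 =>
    match segLoop puzzle_input (puzzle_input.length : Int) (PySem.Str.len row0)
        (pvFuel puzzle_input + 2) 0 starting_loc (PySem.Set.ofList [starting_loc]) with
    | some r => r
    | none => (0, [])

-- ===== PRECONDITION & SPEC =====
-- spec-level copy of one step of the guard's walk (independent of both ports):
-- none = the cell ahead is off the grid, i.e. A's loop terminates
def pvFront (loc : Int × Int) (d : Int) : Int × Int :=
  if d = 0 then (loc.1 - 1, loc.2)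
  else if d = 1 then (loc.1, loc.2 + 1)
  else if d = 2 then (loc.1 + 1, loc.2)
  else (loc.1, loc.2 - 1)

def pvObs (puzzle_input : List String) (loc : Int × Int) : Bool :=
  ((puzzle_input.getD loc.1.toNat "").toList.getD loc.2.toNat ' ') == '#'

def pvStep (puzzle_input : List String) (h w : Int) (st : (Int × Int) × Int) :
    Option ((Int × Int) × Int) :=
  let f := pvFront st.1 st.2
  if f.1 < 0 ∨ h ≤ f.1 ∨ f.2 < 0 ∨ w ≤ f.2 then none
  else if pvObs puzzle_input f then some (st.1, PySem.Int.mod (st.2 + 1) 4)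
  else some (f, st.2)

def pvHalts (puzzle_input : List String) (h w : Int) :
    Nat → ((Int × Int) × Int) → Bool
  | 0, _ => false
  | n + 1, st =>
    match pvStep puzzle_input h w st with
    | none => true
    | some st' => pvHalts puzzle_input h w n st'

-- Pre_ excludes (a) the empty grid and ragged grids with a row shorter than the first —
-- A raises IndexError when the walk enters a short row (and B's obstacle-index build
-- raises IndexError on ANY such grid, even when A's walk avoids it: see the cited
-- example) — and (b) inputs on which the guard's walk cycles forever, so A never
-- returns; since termination of the walk has no shape-only characterisation, it is
-- stated as: the walk exits within the pvFuel state-space bound, which every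
-- terminating walk satisfies.
def Pre_solve_pt1 (puzzle_input : List String) (starting_loc : Int × Int) : Prop :=
  puzzle_input ≠ [] ∧
  (∀ r ∈ puzzle_input, (puzzle_input.headD "").toList.length ≤ r.toList.length) ∧
  pvHalts puzzle_input (puzzle_input.length : Int)
    (((puzzle_input.headD "").toList.length : Nat) : Int) (pvFuel puzzle_input)
    (starting_loc, 0) = true
instance (puzzle_input : List String) (starting_loc : Int × Int) :
    Decidable (Pre_solve_pt1 puzzle_input starting_loc) := by
  unfold Pre_solve_pt1; infer_instance

def pvWitness_solve_pt1 : List String × (Int × Int) := ([".#.", "...", "#.."], (2, 1))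

def Spec_solve_pt1 (puzzle_input : List String) (starting_loc : Int × Int) (out : Int × (List (Int × Int))) : Prop := out = solve_pt1_alt puzzle_input starting_loc
instance (puzzle_input : List String) (starting_loc : Int × Int) (out : Int × (List (Int × Int))) : Decidable (Spec_solve_pt1 puzzle_input starting_loc out) := by unfold Spec_solve_pt1; infer_instance

-- ===== CLAIM (what is proved, stated in full; the proofs are below) =====
def Claim_equal_solve_pt1 : Prop := ∀ (puzzle_input : List String) (starting_loc : Int × Int), Dom_solve_pt1 puzzle_input starting_loc → Pre_solve_pt1 puzzle_input starting_loc → Spec_solve_pt1 puzzle_input starting_loc (solve_pt1 puzzle_input starting_loc)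

-- ===== LEMMAS AND PROOFS =====

-- grid height and width as the proofs speak about them
def gH (p : List String) : Int := (p.length : Int)
def gW (p : List String) : Int := (((p.headD "").toList.length : Nat) : Int)

lemma pyGet?_zero_headD (p : List String) (hp : p ≠ []) :
    PySem.List.pyGet? p 0 = some (p.headD "") := by
  cases p with
  | nil => exact absurd rfl hp
  | cons a l => simp [PySem.List.pyGet?_zero]

lemma cellB_eq (p : List String)
    (hrect : ∀ r ∈ p, (p.headD "").toList.length ≤ r.toList.length)
    {i j : Int} (hi0 : 0 ≤ i) (hih : i < gH p) (hj0 : 0 ≤ j) (hjw : j < gW p) :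
    cellB p i j = some ((p.getD i.toNat "").toList.getD j.toNat ' ') := by
  have hin : i.toNat < p.length := by simp only [gH] at hih; omega
  have hrow : PySem.List.pyGet? p i = some (p.getD i.toNat "") := by
    rw [PySem.List.pyGet?_of_nonneg _ hi0]
    simp [List.getD_eq_getElem?_getD, List.getElem?_eq_getElem hin]
  have hmem : p.getD i.toNat "" ∈ p := by
    have h : p.getD i.toNat "" = p[i.toNat] := by
      simp [List.getD_eq_getElem?_getD, List.getElem?_eq_getElem hin]
    rw [h]; exact List.getElem_mem hin
  have hlen : (p.headD "").toList.length ≤ (p.getD i.toNat "").toList.length :=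
    hrect _ hmem
  have hjn : j.toNat < (p.getD i.toNat "").toList.length := by
    simp only [gW] at hjw; omega
  simp only [cellB, hrow]
  show PySem.Chars.pyGet? (p.getD i.toNat "").toList j = _
  rw [show PySem.Chars.pyGet? = PySem.List.pyGet? (α := Char) from rfl,
    PySem.List.pyGet?_of_nonneg _ hj0, List.getElem?_eq_getElem hjn]
  conv_rhs => rw [List.getD_eq_getElem?_getD, List.getElem?_eq_getElem hjn]
  rfl

lemma cellB_obs_iff (p : List String)
    (hrect : ∀ r ∈ p, (p.headD "").toList.length ≤ r.toList.length)
    {i j : Int} (hi0 : 0 ≤ i) (hih : i < gH p) (hj0 : 0 ≤ j) (hjw : j < gW p) :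
    (cellB p i j = some '#') ↔ pvObs p (i, j) = true := by
  rw [cellB_eq p hrect hi0 hih hj0 hjw]
  simp [pvObs]

lemma mem_colObs (p : List String) {r j : Int} :
    r ∈ colObs p j ↔ (0 ≤ r ∧ r < gH p ∧ cellB p r j = some '#') := by
  simp only [colObs, List.mem_filter, PySem.List.mem_pyRange_one, beq_iff_eq, gH]
  tauto

lemma mem_rowObs (p : List String) {w c i : Int} :
    c ∈ rowObs p w i ↔ (0 ≤ c ∧ c < w ∧ cellB p i c = some '#') := by
  simp only [rowObs, List.mem_filter, PySem.List.mem_pyRange_one, beq_iff_eq]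
  tauto

-- A's step is the spec step, on a nonempty grid with no row shorter than the first
lemma stepA_eq (p : List String) (hp : p ≠ [])
    (hrect : ∀ r ∈ p, (p.headD "").toList.length ≤ r.toList.length)
    (loc : Int × Int) (d : Int) :
    stepA p loc d false =
      match pvStep p (gH p) (gW p) (loc, d) with
      | none => some (loc, d, true)
      | some st' => some (st'.1, st'.2, false) := by
  have hfront : get_front_coords loc d = pvFront loc d := rfl
  have hw : PySem.Str.len (p.headD "") = gW p := rfl
  simp only [stepA, pyGet?_zero_headD p hp, hfront, hw, pvStep]
  set f := pvFront loc d with hf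
  by_cases hoob : f.1 < 0 ∨ gH p ≤ f.1 ∨ f.2 < 0 ∨ gW p ≤ f.2
  · rw [if_pos hoob]
    have hb : out_of_bounds f (gW p) (p.length : Int) = true := by
      simp only [out_of_bounds, gH] at *
      rw [if_pos (by omega)]
    simp [hb]
  · rw [if_neg hoob]
    push_neg at hoob
    obtain ⟨h1, h2, h3, h4⟩ := hoob
    have hoobf : out_of_bounds f (gW p) (p.length : Int) = false := by
      simp only [out_of_bounds, gH] at *
      rw [if_neg (by omega)]
    have hcell := cellB_eq p hrect h1 (by omega) h3 (by omega)
    simp only [cellB] at hcell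
    by_cases hc : ((p.getD f.1.toNat "").toList.getD f.2.toNat ' ') = '#'
    · have hobs : pvObs p f = true := by simp only [pvObs]; rw [hc]; decide
      simp only [hoobf, Bool.false_eq_true, if_false, hobs, if_true]
      cases hrow : PySem.List.pyGet? p f.1 with
      | none => simp only [hrow] at hcell; simp at hcell
      | some row =>
        simp only [hrow] at hcell
        simp only [hcell, if_pos hc]
    · have hobs : pvObs p f = false := by
        simp only [pvObs]
        exact beq_eq_false_iff_ne.mpr hc
      simp only [hoobf, Bool.false_eq_true, if_false, hobs]
      cases hrow : PySem.List.pyGet? p f.1 with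
      | none => simp only [hrow] at hcell; simp at hcell
      | some row =>
        simp only [hrow] at hcell
        simp only [hcell, if_neg hc]

-- if the spec walk halts within n steps, A's loop returns within n+2 fuel
lemma halts_loopA (p : List String) (hp : p ≠ [])
    (hrect : ∀ r ∈ p, (p.headD "").toList.length ≤ r.toList.length) :
    ∀ (n : Nat) (st : (Int × Int) × Int) (V : PySem.Set (Int × Int)),
      pvHalts p (gH p) (gW p) n st = true →
      ∃ R, loopA p (n + 2) st.1 st.2 false V = some R := by
  intro n
  induction n with
  | zero => intro st V h; simp [pvHalts] at h
  | succ n ih =>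
    intro st V h
    simp only [pvHalts] at h
    obtain ⟨loc, d⟩ := st
    simp only [loopA, if_neg (by simp : ¬ (false = true))]
    rw [stepA_eq p hp hrect loc d]
    cases hstep : pvStep p (gH p) (gW p) (loc, d) with
    | none =>
      refine ⟨(((PySem.Set.add V loc).length : Int), PySem.Set.add V loc), ?_⟩
      simp [hstep, loopA]
    | some st' =>
      rw [hstep] at h
      obtain ⟨R, hR⟩ := ih st' (PySem.Set.add V loc) h
      exact ⟨R, hR⟩

-- ===== segment-walk facts: one right turn / one forward cell / the exit =====
lemma seg0_oob (p : List String) (h w : Int) (fuel : Nat) (i j : Int)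
    (V : PySem.Set (Int × Int)) (hc : i - 1 < 0 ∨ h ≤ i - 1 ∨ j < 0 ∨ w ≤ j) :
    segLoop p h w (fuel + 1) 0 (i, j) V = some ((V.length : Int), V) := by
  simp only [segLoop, if_pos hc]
  simp

lemma seg1_oob (p : List String) (h w : Int) (fuel : Nat) (i j : Int)
    (V : PySem.Set (Int × Int)) (hc : i < 0 ∨ h ≤ i ∨ j + 1 < 0 ∨ w ≤ j + 1) :
    segLoop p h w (fuel + 1) 1 (i, j) V = some ((V.length : Int), V) := by
  simp only [segLoop, if_pos hc]
  simp

lemma seg2_oob (p : List String) (h w : Int) (fuel : Nat) (i j : Int)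
    (V : PySem.Set (Int × Int)) (hc : i + 1 < 0 ∨ h ≤ i + 1 ∨ j < 0 ∨ w ≤ j) :
    segLoop p h w (fuel + 1) 2 (i, j) V = some ((V.length : Int), V) := by
  simp only [segLoop, if_pos hc]
  simp

lemma seg3_oob (p : List String) (h w : Int) (fuel : Nat) (i j : Int)
    (V : PySem.Set (Int × Int)) (hc : i < 0 ∨ h ≤ i ∨ j - 1 < 0 ∨ w ≤ j - 1) :
    segLoop p h w (fuel + 1) 3 (i, j) V = some ((V.length : Int), V) := by
  simp only [segLoop, if_pos hc]
  simp

lemma seg0_turn (p : List String) (fuel : Nat) {i j : Int} (V : PySem.Set (Int × Int))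
    (hb : ¬ (i - 1 < 0 ∨ gH p ≤ i - 1 ∨ j < 0 ∨ gW p ≤ j))
    (hobs : cellB p (i - 1) j = some '#') :
    segLoop p (gH p) (gW p) (fuel + 1) 0 (i, j) V =
      segLoop p (gH p) (gW p) fuel 1 (i, j) V := by
  push_neg at hb
  obtain ⟨h1, h2, h3, h4⟩ := hb
  have hmem : (i - 1) ∈ (colObs p j).filter (fun r => decide (r < i)) := by
    rw [List.mem_filter, mem_colObs]
    exact ⟨⟨by omega, by omega, hobs⟩, by simp only [decide_eq_true_eq]; omega⟩
  cases hmax : PySem.List.max? ((colObs p j).filter (fun r => decide (r < i)))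
      (fun x => x) with
  | none =>
    exact absurd ((PySem.List.max?_eq_none_iff _ _).mp hmax) (List.ne_nil_of_mem hmem)
  | some m =>
    have hmlt : m < i := by
      have := (List.mem_filter.mp (PySem.List.max?_mem hmax)).2; simpa using this
    have hile : i - 1 ≤ m := PySem.List.max?_isMax hmax _ hmem
    have hmeq : m = i - 1 := by omega
    simp only [segLoop]
    rw [if_neg (show ¬ (i - 1 < 0 ∨ gH p ≤ i - 1 ∨ j < 0 ∨ gW p ≤ j) by omega), hmax, hmeq]
    try simp only [show ((1:Int) = 0) = False from eq_false (by decide), show ((2:Int) = 0) = False from eq_false (by decide), show ((2:Int) = 1) = False from eq_false (by decide), show ((3:Int) = 0) = False from eq_false (by decide), show ((3:Int) = 1) = False from eq_false (by decide), show ((3:Int) = 2) = False from eq_false (by decide), if_true, if_false]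
    rw [show i - 1 + 1 = i by ring,
      PySem.List.pyRange_neg_one_eq_nil (by omega : i - 1 ≤ i - 1)]
    simp only [List.foldl_nil]
    rw [show PySem.Int.mod ((0 : Int) + 1) 4 = 1 from by decide]

lemma seg1_turn (p : List String) (fuel : Nat) {i j : Int} (V : PySem.Set (Int × Int))
    (hb : ¬ (i < 0 ∨ gH p ≤ i ∨ j + 1 < 0 ∨ gW p ≤ j + 1))
    (hobs : cellB p i (j + 1) = some '#') :
    segLoop p (gH p) (gW p) (fuel + 1) 1 (i, j) V =
      segLoop p (gH p) (gW p) fuel 2 (i, j) V := by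
  push_neg at hb
  obtain ⟨h1, h2, h3, h4⟩ := hb
  have hmem : (j + 1) ∈ (rowObs p (gW p) i).filter (fun c => decide (j < c)) := by
    rw [List.mem_filter, mem_rowObs]
    exact ⟨⟨by omega, by omega, hobs⟩, by simp only [decide_eq_true_eq]; omega⟩
  cases hmin : PySem.List.min? ((rowObs p (gW p) i).filter (fun c => decide (j < c)))
      (fun x => x) with
  | none =>
    exact absurd ((PySem.List.min?_eq_none_iff _ _).mp hmin) (List.ne_nil_of_mem hmem)
  | some m =>
    have hmgt : j < m := by
      have := (List.mem_filter.mp (PySem.List.min?_mem hmin)).2; simpa using this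
    have hile : m ≤ j + 1 := PySem.List.min?_isMin hmin _ hmem
    have hmeq : m = j + 1 := by omega
    simp only [segLoop]
    rw [if_neg (show ¬ (i < 0 ∨ gH p ≤ i ∨ j + 1 < 0 ∨ gW p ≤ j + 1) by omega), hmin, hmeq]
    try simp only [show ((1:Int) = 0) = False from eq_false (by decide), show ((2:Int) = 0) = False from eq_false (by decide), show ((2:Int) = 1) = False from eq_false (by decide), show ((3:Int) = 0) = False from eq_false (by decide), show ((3:Int) = 1) = False from eq_false (by decide), show ((3:Int) = 2) = False from eq_false (by decide), if_true, if_false]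
    rw [show j + 1 - 1 = j by ring,
      PySem.List.pyRange_one_eq_nil (le_refl (j + 1))]
    simp only [List.foldl_nil]
    rw [show PySem.Int.mod ((1 : Int) + 1) 4 = 2 from by decide]

lemma seg2_turn (p : List String) (fuel : Nat) {i j : Int} (V : PySem.Set (Int × Int))
    (hb : ¬ (i + 1 < 0 ∨ gH p ≤ i + 1 ∨ j < 0 ∨ gW p ≤ j))
    (hobs : cellB p (i + 1) j = some '#') :
    segLoop p (gH p) (gW p) (fuel + 1) 2 (i, j) V =
      segLoop p (gH p) (gW p) fuel 3 (i, j) V := by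
  push_neg at hb
  obtain ⟨h1, h2, h3, h4⟩ := hb
  have hmem : (i + 1) ∈ (colObs p j).filter (fun r => decide (i < r)) := by
    rw [List.mem_filter, mem_colObs]
    exact ⟨⟨by omega, by omega, hobs⟩, by simp only [decide_eq_true_eq]; omega⟩
  cases hmin : PySem.List.min? ((colObs p j).filter (fun r => decide (i < r)))
      (fun x => x) with
  | none =>
    exact absurd ((PySem.List.min?_eq_none_iff _ _).mp hmin) (List.ne_nil_of_mem hmem)
  | some m =>
    have hmgt : i < m := by
      have := (List.mem_filter.mp (PySem.List.min?_mem hmin)).2; simpa using this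
    have hile : m ≤ i + 1 := PySem.List.min?_isMin hmin _ hmem
    have hmeq : m = i + 1 := by omega
    simp only [segLoop]
    rw [if_neg (show ¬ (i + 1 < 0 ∨ gH p ≤ i + 1 ∨ j < 0 ∨ gW p ≤ j) by omega), hmin, hmeq]
    try simp only [show ((1:Int) = 0) = False from eq_false (by decide), show ((2:Int) = 0) = False from eq_false (by decide), show ((2:Int) = 1) = False from eq_false (by decide), show ((3:Int) = 0) = False from eq_false (by decide), show ((3:Int) = 1) = False from eq_false (by decide), show ((3:Int) = 2) = False from eq_false (by decide), if_true, if_false]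
    rw [show i + 1 - 1 = i by ring,
      PySem.List.pyRange_one_eq_nil (le_refl (i + 1))]
    simp only [List.foldl_nil]
    rw [show PySem.Int.mod ((2 : Int) + 1) 4 = 3 from by decide]

lemma seg3_turn (p : List String) (fuel : Nat) {i j : Int} (V : PySem.Set (Int × Int))
    (hb : ¬ (i < 0 ∨ gH p ≤ i ∨ j - 1 < 0 ∨ gW p ≤ j - 1))
    (hobs : cellB p i (j - 1) = some '#') :
    segLoop p (gH p) (gW p) (fuel + 1) 3 (i, j) V =
      segLoop p (gH p) (gW p) fuel 0 (i, j) V := by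
  push_neg at hb
  obtain ⟨h1, h2, h3, h4⟩ := hb
  have hmem : (j - 1) ∈ (rowObs p (gW p) i).filter (fun c => decide (c < j)) := by
    rw [List.mem_filter, mem_rowObs]
    exact ⟨⟨by omega, by omega, hobs⟩, by simp only [decide_eq_true_eq]; omega⟩
  cases hmax : PySem.List.max? ((rowObs p (gW p) i).filter (fun c => decide (c < j)))
      (fun x => x) with
  | none =>
    exact absurd ((PySem.List.max?_eq_none_iff _ _).mp hmax) (List.ne_nil_of_mem hmem)
  | some m =>
    have hmlt : m < j := by
      have := (List.mem_filter.mp (PySem.List.max?_mem hmax)).2; simpa using this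
    have hile : j - 1 ≤ m := PySem.List.max?_isMax hmax _ hmem
    have hmeq : m = j - 1 := by omega
    simp only [segLoop]
    rw [if_neg (show ¬ (i < 0 ∨ gH p ≤ i ∨ j - 1 < 0 ∨ gW p ≤ j - 1) by omega), hmax, hmeq]
    try simp only [show ((1:Int) = 0) = False from eq_false (by decide), show ((2:Int) = 0) = False from eq_false (by decide), show ((2:Int) = 1) = False from eq_false (by decide), show ((3:Int) = 0) = False from eq_false (by decide), show ((3:Int) = 1) = False from eq_false (by decide), show ((3:Int) = 2) = False from eq_false (by decide), if_true, if_false]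
    rw [show j - 1 + 1 = j by ring,
      PySem.List.pyRange_neg_one_eq_nil (by omega : j - 1 ≤ j - 1)]
    simp only [List.foldl_nil]
    rw [show PySem.Int.mod ((3 : Int) + 1) 4 = 0 from by decide]

lemma seg0_move (p : List String) (fuel : Nat) {i j : Int} (V : PySem.Set (Int × Int))
    (hb : ¬ (i - 1 < 0 ∨ gH p ≤ i - 1 ∨ j < 0 ∨ gW p ≤ j))
    (hfree : ¬ cellB p (i - 1) j = some '#') :
    segLoop p (gH p) (gW p) (fuel + 1) 0 (i, j) V =
      segLoop p (gH p) (gW p) (fuel + 1) 0 (i - 1, j) (PySem.Set.add V (i - 1, j)) := by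
  push_neg at hb
  obtain ⟨h1, h2, h3, h4⟩ := hb
  have hnotmem : (i - 1) ∉ colObs p j := by
    rw [mem_colObs]; rintro ⟨_, _, hc⟩; exact hfree hc
  have hfilter : (colObs p j).filter (fun r => decide (r < i)) =
      (colObs p j).filter (fun r => decide (r < i - 1)) := by
    apply List.filter_congr
    intro r hr
    have : r ≠ i - 1 := fun h => hnotmem (h ▸ hr)
    simp only [decide_eq_decide]
    omega
  simp only [segLoop, if_true]
  rw [if_neg (show ¬ (i - 1 < 0 ∨ gH p ≤ i - 1 ∨ j < 0 ∨ gW p ≤ j) by omega), hfilter]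
  by_cases hoob2 : i - 1 - 1 < 0 ∨ gH p ≤ i - 1 - 1 ∨ j < 0 ∨ gW p ≤ j
  · have hi1 : i = 1 := by omega
    rw [if_pos hoob2]
    have hfe : (colObs p j).filter (fun r => decide (r < i - 1)) = [] := by
      rw [List.filter_eq_nil_iff]
      intro r hr
      have := (mem_colObs p).mp hr
      simp only [decide_eq_true_eq]; omega
    rw [hfe]
    try simp only [show ((1:Int) = 0) = False from eq_false (by decide), show ((2:Int) = 0) = False from eq_false (by decide), show ((2:Int) = 1) = False from eq_false (by decide), show ((3:Int) = 0) = False from eq_false (by decide), show ((3:Int) = 1) = False from eq_false (by decide), show ((3:Int) = 2) = False from eq_false (by decide), if_true, if_false]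
    subst hi1
    norm_num
    rw [PySem.List.pyRange_neg_one_cons (by omega), PySem.List.pyRange_neg_one_eq_nil (by omega)]
    simp [PySem.List.max?]
  · rw [if_neg hoob2]
    cases hmax : PySem.List.max? ((colObs p j).filter (fun r => decide (r < i - 1)))
        (fun x => x) with
    | none =>
      try simp only [show ((1:Int) = 0) = False from eq_false (by decide), show ((2:Int) = 0) = False from eq_false (by decide), show ((2:Int) = 1) = False from eq_false (by decide), show ((3:Int) = 0) = False from eq_false (by decide), show ((3:Int) = 1) = False from eq_false (by decide), show ((3:Int) = 2) = False from eq_false (by decide), if_true, if_false]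
      rw [PySem.List.pyRange_neg_one_cons (by omega : (0:Int) - 1 < i - 1)]
      simp
    | some m =>
      have hmlt : m < i - 1 := by
        have := (List.mem_filter.mp (PySem.List.max?_mem hmax)).2; simpa using this
      try simp only [show ((1:Int) = 0) = False from eq_false (by decide), show ((2:Int) = 0) = False from eq_false (by decide), show ((2:Int) = 1) = False from eq_false (by decide), show ((3:Int) = 0) = False from eq_false (by decide), show ((3:Int) = 1) = False from eq_false (by decide), show ((3:Int) = 2) = False from eq_false (by decide), if_true, if_false]
      rw [PySem.List.pyRange_neg_one_cons (by omega : m + 1 - 1 < i - 1)]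
      simp

lemma seg1_move (p : List String) (fuel : Nat) {i j : Int} (V : PySem.Set (Int × Int))
    (hb : ¬ (i < 0 ∨ gH p ≤ i ∨ j + 1 < 0 ∨ gW p ≤ j + 1))
    (hfree : ¬ cellB p i (j + 1) = some '#') :
    segLoop p (gH p) (gW p) (fuel + 1) 1 (i, j) V =
      segLoop p (gH p) (gW p) (fuel + 1) 1 (i, j + 1) (PySem.Set.add V (i, j + 1)) := by
  push_neg at hb
  obtain ⟨h1, h2, h3, h4⟩ := hb
  have hnotmem : (j + 1) ∉ rowObs p (gW p) i := by
    rw [mem_rowObs]; rintro ⟨_, _, hc⟩; exact hfree hc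
  have hfilter : (rowObs p (gW p) i).filter (fun c => decide (j < c)) =
      (rowObs p (gW p) i).filter (fun c => decide (j + 1 < c)) := by
    apply List.filter_congr
    intro c hc
    have : c ≠ j + 1 := fun h => hnotmem (h ▸ hc)
    simp only [decide_eq_decide]
    omega
  simp only [segLoop, if_true]
  rw [if_neg (show ¬ (i < 0 ∨ gH p ≤ i ∨ j + 1 < 0 ∨ gW p ≤ j + 1) by omega), hfilter]
  by_cases hoob2 : i < 0 ∨ gH p ≤ i ∨ j + 1 + 1 < 0 ∨ gW p ≤ j + 1 + 1
  · have hj1 : j + 1 = gW p - 1 := by omega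
    rw [if_pos hoob2]
    have hfe : (rowObs p (gW p) i).filter (fun c => decide (j + 1 < c)) = [] := by
      rw [List.filter_eq_nil_iff]
      intro c hc
      have := (mem_rowObs p).mp hc
      simp only [decide_eq_true_eq]; omega
    rw [hfe]
    try simp only [show ((1:Int) = 0) = False from eq_false (by decide), show ((2:Int) = 0) = False from eq_false (by decide), show ((2:Int) = 1) = False from eq_false (by decide), show ((3:Int) = 0) = False from eq_false (by decide), show ((3:Int) = 1) = False from eq_false (by decide), show ((3:Int) = 2) = False from eq_false (by decide), if_true, if_false]
    rw [show gW p - 1 + 1 = j + 1 + 1 by omega,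
      PySem.List.pyRange_one_cons (by omega : j + 1 < j + 1 + 1),
      PySem.List.pyRange_one_eq_nil (by omega : j + 1 + 1 ≤ j + 1 + 1)]
    simp [PySem.List.min?]
  · rw [if_neg hoob2]
    cases hmin : PySem.List.min? ((rowObs p (gW p) i).filter (fun c => decide (j + 1 < c)))
        (fun x => x) with
    | none =>
      try simp only [show ((1:Int) = 0) = False from eq_false (by decide), show ((2:Int) = 0) = False from eq_false (by decide), show ((2:Int) = 1) = False from eq_false (by decide), show ((3:Int) = 0) = False from eq_false (by decide), show ((3:Int) = 1) = False from eq_false (by decide), show ((3:Int) = 2) = False from eq_false (by decide), if_true, if_false]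
      rw [show gW p - 1 + 1 = gW p by ring,
        PySem.List.pyRange_one_cons (by omega : j + 1 < gW p)]
      simp
    | some m =>
      have hmgt : j + 1 < m := by
        have := (List.mem_filter.mp (PySem.List.min?_mem hmin)).2; simpa using this
      try simp only [show ((1:Int) = 0) = False from eq_false (by decide), show ((2:Int) = 0) = False from eq_false (by decide), show ((2:Int) = 1) = False from eq_false (by decide), show ((3:Int) = 0) = False from eq_false (by decide), show ((3:Int) = 1) = False from eq_false (by decide), show ((3:Int) = 2) = False from eq_false (by decide), if_true, if_false]
      rw [PySem.List.pyRange_one_cons (by omega : j + 1 < m - 1 + 1)]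
      simp

lemma seg2_move (p : List String) (fuel : Nat) {i j : Int} (V : PySem.Set (Int × Int))
    (hb : ¬ (i + 1 < 0 ∨ gH p ≤ i + 1 ∨ j < 0 ∨ gW p ≤ j))
    (hfree : ¬ cellB p (i + 1) j = some '#') :
    segLoop p (gH p) (gW p) (fuel + 1) 2 (i, j) V =
      segLoop p (gH p) (gW p) (fuel + 1) 2 (i + 1, j) (PySem.Set.add V (i + 1, j)) := by
  push_neg at hb
  obtain ⟨h1, h2, h3, h4⟩ := hb
  have hnotmem : (i + 1) ∉ colObs p j := by
    rw [mem_colObs]; rintro ⟨_, _, hc⟩; exact hfree hc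
  have hfilter : (colObs p j).filter (fun r => decide (i < r)) =
      (colObs p j).filter (fun r => decide (i + 1 < r)) := by
    apply List.filter_congr
    intro r hr
    have : r ≠ i + 1 := fun h => hnotmem (h ▸ hr)
    simp only [decide_eq_decide]
    omega
  simp only [segLoop, if_true]
  rw [if_neg (show ¬ (i + 1 < 0 ∨ gH p ≤ i + 1 ∨ j < 0 ∨ gW p ≤ j) by omega), hfilter]
  by_cases hoob2 : i + 1 + 1 < 0 ∨ gH p ≤ i + 1 + 1 ∨ j < 0 ∨ gW p ≤ j
  · have hi1 : i + 1 = gH p - 1 := by omega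
    rw [if_pos hoob2]
    have hfe : (colObs p j).filter (fun r => decide (i + 1 < r)) = [] := by
      rw [List.filter_eq_nil_iff]
      intro r hr
      have := (mem_colObs p).mp hr
      simp only [decide_eq_true_eq]; omega
    rw [hfe]
    try simp only [show ((1:Int) = 0) = False from eq_false (by decide), show ((2:Int) = 0) = False from eq_false (by decide), show ((2:Int) = 1) = False from eq_false (by decide), show ((3:Int) = 0) = False from eq_false (by decide), show ((3:Int) = 1) = False from eq_false (by decide), show ((3:Int) = 2) = False from eq_false (by decide), if_true, if_false]
    rw [show gH p - 1 + 1 = i + 1 + 1 by omega,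
      PySem.List.pyRange_one_cons (by omega : i + 1 < i + 1 + 1),
      PySem.List.pyRange_one_eq_nil (by omega : i + 1 + 1 ≤ i + 1 + 1)]
    simp [PySem.List.min?]
  · rw [if_neg hoob2]
    cases hmin : PySem.List.min? ((colObs p j).filter (fun r => decide (i + 1 < r)))
        (fun x => x) with
    | none =>
      try simp only [show ((1:Int) = 0) = False from eq_false (by decide), show ((2:Int) = 0) = False from eq_false (by decide), show ((2:Int) = 1) = False from eq_false (by decide), show ((3:Int) = 0) = False from eq_false (by decide), show ((3:Int) = 1) = False from eq_false (by decide), show ((3:Int) = 2) = False from eq_false (by decide), if_true, if_false]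
      rw [show gH p - 1 + 1 = gH p by ring,
        PySem.List.pyRange_one_cons (by omega : i + 1 < gH p)]
      simp
    | some m =>
      have hmgt : i + 1 < m := by
        have := (List.mem_filter.mp (PySem.List.min?_mem hmin)).2; simpa using this
      try simp only [show ((1:Int) = 0) = False from eq_false (by decide), show ((2:Int) = 0) = False from eq_false (by decide), show ((2:Int) = 1) = False from eq_false (by decide), show ((3:Int) = 0) = False from eq_false (by decide), show ((3:Int) = 1) = False from eq_false (by decide), show ((3:Int) = 2) = False from eq_false (by decide), if_true, if_false]
      rw [PySem.List.pyRange_one_cons (by omega : i + 1 < m - 1 + 1)]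
      simp

lemma seg3_move (p : List String) (fuel : Nat) {i j : Int} (V : PySem.Set (Int × Int))
    (hb : ¬ (i < 0 ∨ gH p ≤ i ∨ j - 1 < 0 ∨ gW p ≤ j - 1))
    (hfree : ¬ cellB p i (j - 1) = some '#') :
    segLoop p (gH p) (gW p) (fuel + 1) 3 (i, j) V =
      segLoop p (gH p) (gW p) (fuel + 1) 3 (i, j - 1) (PySem.Set.add V (i, j - 1)) := by
  push_neg at hb
  obtain ⟨h1, h2, h3, h4⟩ := hb
  have hnotmem : (j - 1) ∉ rowObs p (gW p) i := by
    rw [mem_rowObs]; rintro ⟨_, _, hc⟩; exact hfree hc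
  have hfilter : (rowObs p (gW p) i).filter (fun c => decide (c < j)) =
      (rowObs p (gW p) i).filter (fun c => decide (c < j - 1)) := by
    apply List.filter_congr
    intro c hc
    have : c ≠ j - 1 := fun h => hnotmem (h ▸ hc)
    simp only [decide_eq_decide]
    omega
  simp only [segLoop, if_true]
  rw [if_neg (show ¬ (i < 0 ∨ gH p ≤ i ∨ j - 1 < 0 ∨ gW p ≤ j - 1) by omega), hfilter]
  by_cases hoob2 : i < 0 ∨ gH p ≤ i ∨ j - 1 - 1 < 0 ∨ gW p ≤ j - 1 - 1
  · have hj1 : j = 1 := by omega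
    rw [if_pos hoob2]
    have hfe : (rowObs p (gW p) i).filter (fun c => decide (c < j - 1)) = [] := by
      rw [List.filter_eq_nil_iff]
      intro c hc
      have := (mem_rowObs p).mp hc
      simp only [decide_eq_true_eq]; omega
    rw [hfe]
    try simp only [show ((1:Int) = 0) = False from eq_false (by decide), show ((2:Int) = 0) = False from eq_false (by decide), show ((2:Int) = 1) = False from eq_false (by decide), show ((3:Int) = 0) = False from eq_false (by decide), show ((3:Int) = 1) = False from eq_false (by decide), show ((3:Int) = 2) = False from eq_false (by decide), if_true, if_false]
    subst hj1
    norm_num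
    rw [PySem.List.pyRange_neg_one_cons (by omega), PySem.List.pyRange_neg_one_eq_nil (by omega)]
    simp [PySem.List.max?]
  · rw [if_neg hoob2]
    cases hmax : PySem.List.max? ((rowObs p (gW p) i).filter (fun c => decide (c < j - 1)))
        (fun x => x) with
    | none =>
      try simp only [show ((1:Int) = 0) = False from eq_false (by decide), show ((2:Int) = 0) = False from eq_false (by decide), show ((2:Int) = 1) = False from eq_false (by decide), show ((3:Int) = 0) = False from eq_false (by decide), show ((3:Int) = 1) = False from eq_false (by decide), show ((3:Int) = 2) = False from eq_false (by decide), if_true, if_false]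
      rw [PySem.List.pyRange_neg_one_cons (by omega : (0:Int) - 1 < j - 1)]
      simp
    | some m =>
      have hmlt : m < j - 1 := by
        have := (List.mem_filter.mp (PySem.List.max?_mem hmax)).2; simpa using this
      try simp only [show ((1:Int) = 0) = False from eq_false (by decide), show ((2:Int) = 0) = False from eq_false (by decide), show ((2:Int) = 1) = False from eq_false (by decide), show ((3:Int) = 0) = False from eq_false (by decide), show ((3:Int) = 1) = False from eq_false (by decide), show ((3:Int) = 2) = False from eq_false (by decide), if_true, if_false]
      rw [PySem.List.pyRange_neg_one_cons (by omega : m + 1 - 1 < j - 1)]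
      simp

-- ===== the main simulation: A's walk = B's segment walk =====

lemma main_sim (p : List String) (hp : p ≠ [])
    (hrect : ∀ r ∈ p, (p.headD "").toList.length ≤ r.toList.length) :
    ∀ (fuelA : Nat) (loc : Int × Int) (d : Int),
      (d = 0 ∨ d = 1 ∨ d = 2 ∨ d = 3) →
      ∀ (V : PySem.Set (Int × Int)) R, loopA p fuelA loc d false V = some R →
      ∀ fuelB, fuelA ≤ fuelB →
        segLoop p (gH p) (gW p) fuelB d loc (PySem.Set.add V loc) = some R := by
  intro fuelA
  induction fuelA with
  | zero => intro loc d hd V R hA fuelB hfB; simp [loopA] at hA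
  | succ fA ih =>
    intro loc d hd V R hA fuelB hfB
    obtain ⟨i, j⟩ := loc
    simp only [loopA, Bool.false_eq_true, if_false] at hA
    rw [stepA_eq p hp hrect (i, j) d] at hA
    obtain ⟨fb, rfl⟩ : ∃ fb, fuelB = fb + 1 := ⟨fuelB - 1, by omega⟩
    cases hstep : pvStep p (gH p) (gW p) ((i, j), d) with
    | none =>
      simp only [hstep] at hA
      cases fA with
      | zero => simp [loopA] at hA
      | succ fA' =>
        simp only [loopA, if_true] at hA
        obtain rfl : ((((PySem.Set.add V (i, j)).length : Int), PySem.Set.add V (i, j)) : Int × List (Int × Int)) = R := by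
          exact Option.some_inj.mp hA
        simp only [pvStep] at hstep
        split_ifs at hstep with hoob
        rcases hd with rfl | rfl | rfl | rfl
        · simp only [show pvFront (i, j) 0 = (i - 1, j) from rfl] at hoob
          exact seg0_oob p (gH p) (gW p) fb i j (PySem.Set.add V (i, j)) hoob
        · simp only [show pvFront (i, j) 1 = (i, j + 1) from rfl] at hoob
          exact seg1_oob p (gH p) (gW p) fb i j (PySem.Set.add V (i, j)) hoob
        · simp only [show pvFront (i, j) 2 = (i + 1, j) from rfl] at hoob
          exact seg2_oob p (gH p) (gW p) fb i j (PySem.Set.add V (i, j)) hoob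
        · simp only [show pvFront (i, j) 3 = (i, j - 1) from rfl] at hoob
          exact seg3_oob p (gH p) (gW p) fb i j (PySem.Set.add V (i, j)) hoob
    | some st' =>
      simp only [hstep] at hA
      simp only [pvStep] at hstep
      split_ifs at hstep with hoob hobs
      · -- obstacle ahead: A turns in place; B's segment lemma consumes one outer fuel
        rw [Option.some_inj] at hstep
        subst hstep
        have hmem : (i, j) ∈ PySem.Set.add V (i, j) :=
          (PySem.Set.mem_add V (i, j) (i, j)).mpr (Or.inr rfl)
        rcases hd with rfl | rfl | rfl | rfl
        · simp only [show pvFront (i, j) 0 = (i - 1, j) from rfl] at hoob hobs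
          simp only [show PySem.Int.mod ((0 : Int) + 1) 4 = 1 from by decide] at hA
          have hIH := ih (i, j) 1 (by tauto) (PySem.Set.add V (i, j)) R hA fb (by omega)
          rw [PySem.Set.add_of_mem hmem] at hIH
          rw [seg0_turn p fb (PySem.Set.add V (i, j)) hoob
            ((cellB_obs_iff p hrect (by omega) (by omega) (by omega) (by omega)).mpr hobs)]
          exact hIH
        · simp only [show pvFront (i, j) 1 = (i, j + 1) from rfl] at hoob hobs
          simp only [show PySem.Int.mod ((1 : Int) + 1) 4 = 2 from by decide] at hA
          have hIH := ih (i, j) 2 (by tauto) (PySem.Set.add V (i, j)) R hA fb (by omega)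
          rw [PySem.Set.add_of_mem hmem] at hIH
          rw [seg1_turn p fb (PySem.Set.add V (i, j)) hoob
            ((cellB_obs_iff p hrect (by omega) (by omega) (by omega) (by omega)).mpr hobs)]
          exact hIH
        · simp only [show pvFront (i, j) 2 = (i + 1, j) from rfl] at hoob hobs
          simp only [show PySem.Int.mod ((2 : Int) + 1) 4 = 3 from by decide] at hA
          have hIH := ih (i, j) 3 (by tauto) (PySem.Set.add V (i, j)) R hA fb (by omega)
          rw [PySem.Set.add_of_mem hmem] at hIH
          rw [seg2_turn p fb (PySem.Set.add V (i, j)) hoob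
            ((cellB_obs_iff p hrect (by omega) (by omega) (by omega) (by omega)).mpr hobs)]
          exact hIH
        · simp only [show pvFront (i, j) 3 = (i, j - 1) from rfl] at hoob hobs
          simp only [show PySem.Int.mod ((3 : Int) + 1) 4 = 0 from by decide] at hA
          have hIH := ih (i, j) 0 (by tauto) (PySem.Set.add V (i, j)) R hA fb (by omega)
          rw [PySem.Set.add_of_mem hmem] at hIH
          rw [seg3_turn p fb (PySem.Set.add V (i, j)) hoob
            ((cellB_obs_iff p hrect (by omega) (by omega) (by omega) (by omega)).mpr hobs)]
          exact hIH
      · -- free cell ahead: A moves one cell; B's segment shrinks by that cell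
        rw [Option.some_inj] at hstep
        subst hstep
        rcases hd with rfl | rfl | rfl | rfl
        · simp only [show pvFront (i, j) 0 = (i - 1, j) from rfl] at hoob hobs hA
          have hIH := ih (i - 1, j) 0 (by tauto) (PySem.Set.add V (i, j)) R hA (fb + 1) (by omega)
          rw [seg0_move p fb (PySem.Set.add V (i, j)) hoob
            (fun hcon => hobs ((cellB_obs_iff p hrect (by omega) (by omega) (by omega) (by omega)).mp hcon))]
          exact hIH
        · simp only [show pvFront (i, j) 1 = (i, j + 1) from rfl] at hoob hobs hA
          have hIH := ih (i, j + 1) 1 (by tauto) (PySem.Set.add V (i, j)) R hA (fb + 1) (by omega)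
          rw [seg1_move p fb (PySem.Set.add V (i, j)) hoob
            (fun hcon => hobs ((cellB_obs_iff p hrect (by omega) (by omega) (by omega) (by omega)).mp hcon))]
          exact hIH
        · simp only [show pvFront (i, j) 2 = (i + 1, j) from rfl] at hoob hobs hA
          have hIH := ih (i + 1, j) 2 (by tauto) (PySem.Set.add V (i, j)) R hA (fb + 1) (by omega)
          rw [seg2_move p fb (PySem.Set.add V (i, j)) hoob
            (fun hcon => hobs ((cellB_obs_iff p hrect (by omega) (by omega) (by omega) (by omega)).mp hcon))]
          exact hIH
        · simp only [show pvFront (i, j) 3 = (i, j - 1) from rfl] at hoob hobs hA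
          have hIH := ih (i, j - 1) 3 (by tauto) (PySem.Set.add V (i, j)) R hA (fb + 1) (by omega)
          rw [seg3_move p fb (PySem.Set.add V (i, j)) hoob
            (fun hcon => hobs ((cellB_obs_iff p hrect (by omega) (by omega) (by omega) (by omega)).mp hcon))]
          exact hIH

-- ===== VERDICT (by name: the statement is the Claim_ definition above) =====
theorem solve_pt1_spec : Claim_equal_solve_pt1 := by
  intro p s _ hpre
  obtain ⟨hp, hrect, hhalts⟩ := hpre
  obtain ⟨R, hR⟩ := halts_loopA p hp hrect (pvFuel p) (s, 0) PySem.Set.empty hhalts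
  show solve_pt1 p s = solve_pt1_alt p s
  have hB := main_sim p hp hrect (pvFuel p + 2) s 0 (by tauto) PySem.Set.empty R hR
    (pvFuel p + 2) le_rfl
  simp only [solve_pt1, hR]
  simp only [solve_pt1_alt, pyGet?_zero_headD p hp]
  rw [show PySem.Str.len (p.headD "") = gW p from rfl,
    show (p.length : Int) = gH p from rfl,
    show PySem.Set.ofList [s] = PySem.Set.add PySem.Set.empty s from rfl, hB]
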